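-- pv_equiv track=rewrite | github.com/timvdlee/advent_of_code_2023 | day10/day10p2.py | convertGridTo2dMatrix
-- ===== SOURCE A (Python) =====
-- def convertGridTo2dMatrix(grid,xLen,yLen):
--     endGrid = []
--     for y in range(yLen*3):
--         line = []
--         for x in range(xLen*3):
--             yLineIndex = y//3
--             xblockIndex = x//3
--             yblockLineIndex = y % 3
--             xblockLineIndex = x % 3
--             line.append(grid[yLineIndex][xblockIndex][yblockLineIndex][xblockLineIndex])
--         endGrid.append(line)
--     return endGrid
-- ===== SOURCE B (Python) =====
-- def convertGridTo2dMatrix(grid, xLen, yLen):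
--     endGrid = []
--     for yb in range(yLen):
--         blocks = [grid[yb][xb] for xb in range(xLen)]
--         for sub in range(3):
--             line = []
--             for blk in blocks:
--                 line += blk[sub][:3]
--             endGrid.append(line)
--     return endGrid
-- ===== Notes on version B (the rewrite author's own statement) =====
-- stated objective: alternative
-- what changed: B is a two-stage structural walk: per block-row it first materializes the row of 3x3 blocks, then builds each of the three output lines by concatenating the blocks' sub-row slices [:3], instead of A's flat output-coordinate loop that decodes block indices with //3 and %3 and appends element by element.
import Mathlib
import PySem

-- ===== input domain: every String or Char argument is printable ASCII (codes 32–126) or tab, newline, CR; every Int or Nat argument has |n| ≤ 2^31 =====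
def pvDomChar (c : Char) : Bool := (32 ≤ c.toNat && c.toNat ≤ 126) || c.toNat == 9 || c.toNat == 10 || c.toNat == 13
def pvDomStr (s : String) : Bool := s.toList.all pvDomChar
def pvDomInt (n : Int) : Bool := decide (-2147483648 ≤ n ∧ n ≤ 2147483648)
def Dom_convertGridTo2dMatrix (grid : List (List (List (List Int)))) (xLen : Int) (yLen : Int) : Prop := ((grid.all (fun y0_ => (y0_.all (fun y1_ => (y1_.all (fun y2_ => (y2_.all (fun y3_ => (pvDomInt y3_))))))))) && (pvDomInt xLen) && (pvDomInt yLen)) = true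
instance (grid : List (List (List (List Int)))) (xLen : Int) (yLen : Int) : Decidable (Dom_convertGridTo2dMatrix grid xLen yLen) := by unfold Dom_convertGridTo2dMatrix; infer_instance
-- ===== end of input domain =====

-- B is a two-stage structural walk (materialize each block-row, then concatenate sub-row slices)
-- instead of A's flat coordinate loop decoded with //3 and %3; same cost, different decomposition.

-- ===== PORT A =====
def convertGridTo2dMatrix (grid : List (List (List (List Int)))) (xLen : Int) (yLen : Int) : List (List Int) :=
  (PySem.List.pyRange 0 (yLen*3) 1).foldl (fun endGrid y =>
    endGrid ++ [(PySem.List.pyRange 0 (xLen*3) 1).foldl (fun line x =>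
      line ++ [PySem.List.pyGetD (PySem.List.pyGetD (PySem.List.pyGetD (PySem.List.pyGetD grid (PySem.Int.floordiv y 3) []) (PySem.Int.floordiv x 3) []) (PySem.Int.mod y 3) []) (PySem.Int.mod x 3) 0]) []]) []

-- ===== PORT B =====
def convertGridTo2dMatrix_alt (grid : List (List (List (List Int)))) (xLen : Int) (yLen : Int) : List (List Int) :=
  (PySem.List.pyRange 0 yLen 1).foldl (fun endGrid yb =>
    let blocks := (PySem.List.pyRange 0 xLen 1).map (fun xb =>
      PySem.List.pyGetD (PySem.List.pyGetD grid yb []) xb [])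
    (PySem.List.pyRange 0 3 1).foldl (fun eg sub =>
      eg ++ [blocks.foldl (fun line blk =>
        line ++ PySem.List.slice (PySem.List.pyGetD blk sub []) none (some 3)) []]) endGrid) []

-- ===== PRECONDITION & SPEC =====
-- Pre_ excludes exactly the inputs on which the Python A raises IndexError (a row/block/sub-row
-- of the accessed region shorter than required); A raises on exactly those inputs.
def Pre_convertGridTo2dMatrix (grid : List (List (List (List Int)))) (xLen : Int) (yLen : Int) : Prop :=
  yLen ≤ 0 ∨ xLen ≤ 0 ∨
    (yLen ≤ (grid.length : Int) ∧
      ∀ row ∈ grid.take yLen.toNat, xLen ≤ (row.length : Int) ∧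
        ∀ blk ∈ row.take xLen.toNat, 3 ≤ blk.length ∧
          ∀ sub ∈ blk.take 3, 3 ≤ sub.length)
instance (grid : List (List (List (List Int)))) (xLen : Int) (yLen : Int) : Decidable (Pre_convertGridTo2dMatrix grid xLen yLen) := by unfold Pre_convertGridTo2dMatrix; infer_instance

def pvWitness_convertGridTo2dMatrix : List (List (List (List Int))) × Int × Int :=
  ([[[[1,2,3],[4,5,6],[7,8,9]]]], 1, 1)

def Spec_convertGridTo2dMatrix (grid : List (List (List (List Int)))) (xLen : Int) (yLen : Int) (out : List (List Int)) : Prop := out = convertGridTo2dMatrix_alt grid xLen yLen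
instance (grid : List (List (List (List Int)))) (xLen : Int) (yLen : Int) (out : List (List Int)) : Decidable (Spec_convertGridTo2dMatrix grid xLen yLen out) := by unfold Spec_convertGridTo2dMatrix; infer_instance

-- ===== CLAIM (what is proved, stated in full; the proofs are below) =====
def Claim_equal_convertGridTo2dMatrix : Prop := ∀ (grid : List (List (List (List Int)))) (xLen : Int) (yLen : Int), Dom_convertGridTo2dMatrix grid xLen yLen → Pre_convertGridTo2dMatrix grid xLen yLen → Spec_convertGridTo2dMatrix grid xLen yLen (convertGridTo2dMatrix grid xLen yLen)

-- ===== LEMMAS AND PROOFS =====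

lemma pyRange03 : PySem.List.pyRange 0 3 1 = [0, 1, 2] := by decide

-- splitting range(0, 3*m) into m blocks of 3 (Nat-cast bound)
lemma tripleSplit_nat {α : Type} (m : Nat) (f : Int → α) :
    (PySem.List.pyRange 0 ((m : Int) * 3) 1).map f
      = (PySem.List.pyRange 0 (m : Int) 1).flatMap
          (fun k => ([0, 1, 2] : List Int).map (fun s => f (3 * k + s))) := by
  induction m with
  | zero => simp [PySem.List.pyRange_one_eq_nil]
  | succ m ih =>
      have h1 : ((m + 1 : Nat) : Int) = (m : Int) + 1 := by push_cast; ring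
      rw [h1]
      have h2 : ((m : Int) + 1) * 3 = (((m : Int) * 3 + 1) + 1) + 1 := by ring
      rw [h2,
        PySem.List.pyRange_one_succ_right (by positivity),
        PySem.List.pyRange_one_succ_right (by positivity),
        PySem.List.pyRange_one_succ_right (by positivity),
        PySem.List.pyRange_one_succ_right (by positivity)]
      simp only [List.map_append, List.flatMap_append, ih]
      simp [List.map, List.flatMap]
      refine ⟨?_, ?_, ?_⟩ <;> (congr 1; ring)

-- splitting range(0, n*3) into blocks of 3, any integer n
lemma tripleSplit {α : Type} (n : Int) (f : Int → α) :
    (PySem.List.pyRange 0 (n * 3) 1).map f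
      = (PySem.List.pyRange 0 n 1).flatMap
          (fun k => ([0, 1, 2] : List Int).map (fun s => f (3 * k + s))) := by
  by_cases h : n ≤ 0
  · rw [PySem.List.pyRange_one_eq_nil (by nlinarith), PySem.List.pyRange_one_eq_nil h]
    simp
  · have : ((n.toNat : Int)) = n := Int.toNat_of_nonneg (by omega)
    rw [← this]; exact tripleSplit_nat n.toNat f

lemma divmod3 (k s : Int) (h0 : 0 ≤ s) (h2 : s < 3) :
    PySem.Int.floordiv (3 * k + s) 3 = k ∧ PySem.Int.mod (3 * k + s) 3 = s := by
  rw [PySem.Int.floordiv_eq_ediv_of_pos (by norm_num),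
      PySem.Int.mod_eq_emod_of_pos (by norm_num)]
  omega

-- a length-≥3 list: its [:3] slice is its first three elements
lemma slice3_eq_gets (l : List Int) (h : 3 ≤ l.length) :
    PySem.List.slice l none (some 3) =
      [PySem.List.pyGetD l 0 0, PySem.List.pyGetD l 1 0, PySem.List.pyGetD l 2 0] := by
  match l, h with
  | a :: b :: c :: t, _ => simp [pysem]

-- an in-range element of a list lies in any take that covers its index
lemma getElem_mem_take {α : Type} (l : List α) (n i : Nat) (h : i < n) (h2 : i < l.length) :
    l[i] ∈ l.take n := by
  have h3 : i < (l.take n).length := by simp; omega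
  rw [← List.getElem_take (xs := l) (h := h3)]
  exact List.getElem_mem h3

-- ===== VERDICT (by name: the statement is the Claim_ definition above) =====
theorem convertGridTo2dMatrix_spec : Claim_equal_convertGridTo2dMatrix := by
  intro grid xLen yLen _ hpre
  unfold Spec_convertGridTo2dMatrix convertGridTo2dMatrix convertGridTo2dMatrix_alt
  simp only [PySem.List.foldl_append_singleton_eq_map, PySem.List.foldl_append_eq_flatMap,
    List.nil_append]
  simp only [tripleSplit, pyRange03, List.flatMap_map]
  apply List.flatMap_congr
  intro yb hyb
  apply List.map_congr_left
  intro s hs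
  apply List.flatMap_congr
  intro xb hxb
  rw [PySem.List.mem_pyRange_one] at hyb hxb
  simp only [List.mem_cons, List.not_mem_nil, or_false] at hs
  have hs' : 0 ≤ s ∧ s < 3 := by omega
  -- the accessed sub-row has length ≥ 3 (from Pre_; the degenerate branches contradict membership)
  have hlen : 3 ≤ (PySem.List.pyGetD (PySem.List.pyGetD (PySem.List.pyGetD grid yb []) xb []) s []).length := by
    rcases hpre with h | h | ⟨hy, hmain⟩
    · omega
    · omega
    · have hybN : yb.toNat < grid.length := by omega
      rw [PySem.List.pyGetD_eq_getElem grid [] (by omega) (by omega)]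
      have hrowmem : grid[yb.toNat] ∈ grid.take yLen.toNat := getElem_mem_take _ _ _ (by omega) hybN
      obtain ⟨hx, hblks⟩ := hmain _ hrowmem
      have hxbN : xb.toNat < grid[yb.toNat].length := by omega
      rw [PySem.List.pyGetD_eq_getElem grid[yb.toNat] [] (by omega) (by omega)]
      have hblkmem : grid[yb.toNat][xb.toNat] ∈ grid[yb.toNat].take xLen.toNat :=
        getElem_mem_take _ _ _ (by omega) hxbN
      obtain ⟨h3, hsubs⟩ := hblks _ hblkmem
      have hsN : s.toNat < grid[yb.toNat][xb.toNat].length := by omega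
      rw [PySem.List.pyGetD_eq_getElem grid[yb.toNat][xb.toNat] [] (by omega) (by omega)]
      exact hsubs _ (getElem_mem_take _ _ _ (by omega) hsN)
  rw [slice3_eq_gets _ hlen]
  have hd := fun c h0 h2 => (divmod3 xb c h0 h2)
  have hy := divmod3 yb s hs'.1 hs'.2
  simp only [List.map_cons, List.map_nil, hy.1, hy.2,
    (hd 0 (by norm_num) (by norm_num)).1, (hd 0 (by norm_num) (by norm_num)).2,
    (hd 1 (by norm_num) (by norm_num)).1, (hd 1 (by norm_num) (by norm_num)).2,
    (hd 2 (by norm_num) (by norm_num)).1, (hd 2 (by norm_num) (by norm_num)).2]
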